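-- pv_equiv track=rewrite | github.com/Matteorogari/fds-kaggle-competition-2025-luc-anto-mat | src/features_10_feat.py | compute_base_stat_differences
-- ===== SOURCE A (Python) =====
-- def compute_base_stat_differences(p1_team_state, p2_team_state, stat_registry):
--     # Computes aggregated differences of base stats between the two teams
--     p1_total_speed = 0
--     p2_total_speed = 0
--     p1_total_attack = 0
--     p2_total_attack = 0
--     p1_total_sp_attack = 0
--     p2_total_sp_attack = 0
--     p1_total_sp_defense = 0
--     p2_total_sp_defense = 0
--     p1_total_hp = 0
--     p2_total_hp = 0
--
--     for pokemon in p1_team_state.keys():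
--         if pokemon in stat_registry:
--             p1_total_speed += stat_registry[pokemon]['base_spe']
--             p1_total_attack += stat_registry[pokemon]['base_atk']
--             p1_total_sp_attack += stat_registry[pokemon]['base_spa']
--             p1_total_sp_defense += stat_registry[pokemon]['base_spd']
--             p1_total_hp += stat_registry[pokemon]['base_hp']
--
--     for pokemon in p2_team_state.keys():
--         if pokemon in stat_registry:
--             p2_total_speed += stat_registry[pokemon]['base_spe']
--             p2_total_attack += stat_registry[pokemon]['base_atk']
--             p2_total_sp_attack += stat_registry[pokemon]['base_spa']
--             p2_total_sp_defense += stat_registry[pokemon]['base_spd']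
--             p2_total_hp += stat_registry[pokemon]['base_hp']
--
--     speed_sum_diff = p1_total_speed - p2_total_speed
--     attack_sum_diff = p1_total_attack - p2_total_attack
--     sp_attack_sum_diff = p1_total_sp_attack - p2_total_sp_attack
--     sp_defense_sum_diff = p1_total_sp_defense - p2_total_sp_defense
--     hp_sum_diff = p1_total_hp - p2_total_hp
--
--     return speed_sum_diff, attack_sum_diff, sp_attack_sum_diff, sp_defense_sum_diff, hp_sum_diff
-- ===== SOURCE B (Python) =====
-- def compute_base_stat_differences(p1_team_state, p2_team_state, stat_registry):
--     # One signed pass over the registry: each registry pokemon contributes its base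
--     # stats weighted by (in p1 team) - (in p2 team); teams become membership sets.
--     p1_keys = set(p1_team_state)
--     p2_keys = set(p2_team_state)
--     spe = atk = spa = spd = hp = 0
--     for pokemon, stats in stat_registry.items():
--         coef = (pokemon in p1_keys) - (pokemon in p2_keys)
--         if coef:
--             spe += coef * stats['base_spe']
--             atk += coef * stats['base_atk']
--             spa += coef * stats['base_spa']
--             spd += coef * stats['base_spd']
--             hp += coef * stats['base_hp']
--     return spe, atk, spa, spd, hp
-- ===== Notes on version B (the rewrite author's own statement) =====
-- stated objective: alternative
-- what changed: Instead of A's two team-driven loops with ten scalar accumulators later differenced, B precomputes the two team-key sets and makes a single signed pass over the stat registry, weighting each registry pokemon's five stats by the coefficient (in p1 team) - (in p2 team) and accumulating the difference directly.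
import Mathlib
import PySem

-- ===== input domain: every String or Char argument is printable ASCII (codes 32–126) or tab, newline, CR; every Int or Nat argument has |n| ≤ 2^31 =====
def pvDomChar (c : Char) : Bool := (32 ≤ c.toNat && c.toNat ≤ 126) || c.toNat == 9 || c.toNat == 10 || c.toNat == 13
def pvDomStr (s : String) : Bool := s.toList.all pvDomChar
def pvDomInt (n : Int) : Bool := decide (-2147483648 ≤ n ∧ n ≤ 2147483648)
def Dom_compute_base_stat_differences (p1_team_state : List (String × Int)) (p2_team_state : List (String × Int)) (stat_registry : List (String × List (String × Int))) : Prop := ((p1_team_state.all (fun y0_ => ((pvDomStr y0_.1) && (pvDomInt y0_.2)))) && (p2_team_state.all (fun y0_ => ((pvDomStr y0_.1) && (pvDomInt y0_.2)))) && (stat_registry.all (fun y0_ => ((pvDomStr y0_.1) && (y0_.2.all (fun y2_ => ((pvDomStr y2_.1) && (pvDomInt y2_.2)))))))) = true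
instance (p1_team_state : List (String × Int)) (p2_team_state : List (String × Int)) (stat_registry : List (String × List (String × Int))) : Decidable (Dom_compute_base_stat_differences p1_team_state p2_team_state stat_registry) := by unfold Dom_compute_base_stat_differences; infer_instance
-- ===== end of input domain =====

-- B replaces A's two team-driven accumulation loops by a single signed pass over the
-- stat registry: each registry pokemon's stats are weighted by (in p1 team) - (in p2 team)
-- against precomputed team-key sets, accumulating the difference directly (objective: alternative).


-- ===== PORT A =====
-- one loop iteration of A: add the five base stats of `pokemon` (when present in the registry)
-- to the five scalar accumulators.  stats[name] raises KeyError in Python when absent; Pre_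
-- excludes those inputs, so `getD … 0` is exact inside Pre_.
def pvStepA (reg : PySem.Dict String (List (String × Int)))
    (acc : Int × Int × Int × Int × Int) (pokemon : String) : Int × Int × Int × Int × Int :=
  if reg.contains pokemon then
    let stats := PySem.Dict.ofList (reg.getD pokemon [])
    (acc.1 + stats.getD "base_spe" 0, acc.2.1 + stats.getD "base_atk" 0,
     acc.2.2.1 + stats.getD "base_spa" 0, acc.2.2.2.1 + stats.getD "base_spd" 0,
     acc.2.2.2.2 + stats.getD "base_hp" 0)
  else acc

def compute_base_stat_differences (p1_team_state : List (String × Int)) (p2_team_state : List (String × Int)) (stat_registry : List (String × List (String × Int))) : Int × Int × Int × Int × Int :=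
  let reg := PySem.Dict.ofList stat_registry
  let t1 := (PySem.Dict.ofList p1_team_state).keys.foldl (pvStepA reg) (0, 0, 0, 0, 0)
  let t2 := (PySem.Dict.ofList p2_team_state).keys.foldl (pvStepA reg) (0, 0, 0, 0, 0)
  (t1.1 - t2.1, t1.2.1 - t2.2.1, t1.2.2.1 - t2.2.2.1, t1.2.2.2.1 - t2.2.2.2.1, t1.2.2.2.2 - t2.2.2.2.2)

-- ===== PORT B =====
-- one loop iteration of B: weight the registry entry's stats by the signed coefficient
-- (pokemon in p1_keys) - (pokemon in p2_keys); `if coef:` skips zero coefficients.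
def pvStepB (p1_keys p2_keys : PySem.Set String)
    (acc : Int × Int × Int × Int × Int) (kv : String × List (String × Int)) : Int × Int × Int × Int × Int :=
  let coef : Int := (if PySem.Set.contains p1_keys kv.1 then 1 else 0) -
                    (if PySem.Set.contains p2_keys kv.1 then 1 else 0)
  if coef ≠ 0 then
    let stats := PySem.Dict.ofList kv.2
    (acc.1 + coef * stats.getD "base_spe" 0, acc.2.1 + coef * stats.getD "base_atk" 0,
     acc.2.2.1 + coef * stats.getD "base_spa" 0, acc.2.2.2.1 + coef * stats.getD "base_spd" 0,
     acc.2.2.2.2 + coef * stats.getD "base_hp" 0)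
  else acc

def compute_base_stat_differences_alt (p1_team_state : List (String × Int)) (p2_team_state : List (String × Int)) (stat_registry : List (String × List (String × Int))) : Int × Int × Int × Int × Int :=
  let p1_keys := PySem.Set.ofList (PySem.Dict.ofList p1_team_state).keys
  let p2_keys := PySem.Set.ofList (PySem.Dict.ofList p2_team_state).keys
  (PySem.Dict.ofList stat_registry).items.foldl (pvStepB p1_keys p2_keys) (0, 0, 0, 0, 0)

-- ===== PRECONDITION & SPEC =====
-- Pre_ excludes exactly the inputs on which Python A raises KeyError: a team pokemon present
-- in stat_registry whose stats dict lacks one of the five base-stat keys.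
def Pre_compute_base_stat_differences (p1_team_state : List (String × Int)) (p2_team_state : List (String × Int)) (stat_registry : List (String × List (String × Int))) : Prop :=
  ((p1_team_state ++ p2_team_state).all (fun q =>
    !(PySem.Dict.ofList stat_registry).contains q.1 ||
    (["base_spe", "base_atk", "base_spa", "base_spd", "base_hp"]).all (fun s =>
      (PySem.Dict.ofList ((PySem.Dict.ofList stat_registry).getD q.1 [])).contains s))) = true
instance (p1_team_state : List (String × Int)) (p2_team_state : List (String × Int)) (stat_registry : List (String × List (String × Int))) : Decidable (Pre_compute_base_stat_differences p1_team_state p2_team_state stat_registry) := by unfold Pre_compute_base_stat_differences; infer_instance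

def pvWitness_compute_base_stat_differences : (List (String × Int)) × (List (String × Int)) × (List (String × List (String × Int))) :=
  ([("a", 1)], [("b", 2)],
   [("a", [("base_spe", 10), ("base_atk", 20), ("base_spa", 30), ("base_spd", 40), ("base_hp", 50)])])

def Spec_compute_base_stat_differences (p1_team_state : List (String × Int)) (p2_team_state : List (String × Int)) (stat_registry : List (String × List (String × Int))) (out : Int × Int × Int × Int × Int) : Prop := out = compute_base_stat_differences_alt p1_team_state p2_team_state stat_registry
instance (p1_team_state : List (String × Int)) (p2_team_state : List (String × Int)) (stat_registry : List (String × List (String × Int))) (out : Int × Int × Int × Int × Int) : Decidable (Spec_compute_base_stat_differences p1_team_state p2_team_state stat_registry out) := by unfold Spec_compute_base_stat_differences; infer_instance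

-- ===== CLAIM (what is proved, stated in full; the proofs are below) =====
def Claim_equal_compute_base_stat_differences : Prop := ∀ (p1_team_state : List (String × Int)) (p2_team_state : List (String × Int)) (stat_registry : List (String × List (String × Int))), Dom_compute_base_stat_differences p1_team_state p2_team_state stat_registry → Pre_compute_base_stat_differences p1_team_state p2_team_state stat_registry → Spec_compute_base_stat_differences p1_team_state p2_team_state stat_registry (compute_base_stat_differences p1_team_state p2_team_state stat_registry)

-- ===== LEMMAS AND PROOFS =====

-- per-stat total of A's loop over a list of team keys, as a sum
def sumC (reg : PySem.Dict String (List (String × Int))) (s : String) (ks : List String) : Int :=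
  (ks.map (fun p => if reg.contains p then (PySem.Dict.ofList (reg.getD p [])).getD s 0 else 0)).sum

-- per-stat total of B's loop over the registry items, as a sum
def sumB (p1k p2k : PySem.Set String) (s : String) (L : List (String × List (String × Int))) : Int :=
  (L.map (fun kv =>
    ((if PySem.Set.contains p1k kv.1 then (1 : Int) else 0) -
     (if PySem.Set.contains p2k kv.1 then (1 : Int) else 0)) *
    (PySem.Dict.ofList kv.2).getD s 0)).sum

theorem foldA_eq (reg : PySem.Dict String (List (String × Int))) :
    ∀ (ks : List String) (z : Int × Int × Int × Int × Int),
      ks.foldl (pvStepA reg) z =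
        (z.1 + sumC reg "base_spe" ks, z.2.1 + sumC reg "base_atk" ks,
         z.2.2.1 + sumC reg "base_spa" ks, z.2.2.2.1 + sumC reg "base_spd" ks,
         z.2.2.2.2 + sumC reg "base_hp" ks) := by
  intro ks
  induction ks with
  | nil => intro z; simp [sumC]
  | cons k ks ih =>
    intro z
    simp only [List.foldl_cons, pvStepA]
    by_cases h : reg.contains k = true
    · simp only [h, if_true]
      rw [ih]
      simp only [sumC, List.map_cons, List.sum_cons, h, if_true, Prod.mk.injEq]
      refine ⟨by ring, by ring, by ring, by ring, by ring⟩
    · simp only [if_neg h]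
      rw [ih]
      simp [sumC, h]

-- the `if coef:` guard is redundant for the value: skipping a zero coefficient adds zero
theorem pvStepB_eq (p1k p2k : PySem.Set String) (acc : Int × Int × Int × Int × Int)
    (kv : String × List (String × Int)) :
    pvStepB p1k p2k acc kv =
      ((acc.1 + ((if PySem.Set.contains p1k kv.1 then (1 : Int) else 0) -
          (if PySem.Set.contains p2k kv.1 then (1 : Int) else 0)) * (PySem.Dict.ofList kv.2).getD "base_spe" 0),
       (acc.2.1 + ((if PySem.Set.contains p1k kv.1 then (1 : Int) else 0) -
          (if PySem.Set.contains p2k kv.1 then (1 : Int) else 0)) * (PySem.Dict.ofList kv.2).getD "base_atk" 0),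
       (acc.2.2.1 + ((if PySem.Set.contains p1k kv.1 then (1 : Int) else 0) -
          (if PySem.Set.contains p2k kv.1 then (1 : Int) else 0)) * (PySem.Dict.ofList kv.2).getD "base_spa" 0),
       (acc.2.2.2.1 + ((if PySem.Set.contains p1k kv.1 then (1 : Int) else 0) -
          (if PySem.Set.contains p2k kv.1 then (1 : Int) else 0)) * (PySem.Dict.ofList kv.2).getD "base_spd" 0),
       (acc.2.2.2.2 + ((if PySem.Set.contains p1k kv.1 then (1 : Int) else 0) -
          (if PySem.Set.contains p2k kv.1 then (1 : Int) else 0)) * (PySem.Dict.ofList kv.2).getD "base_hp" 0)) := by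
  simp only [pvStepB]
  by_cases h : ((if PySem.Set.contains p1k kv.1 then (1 : Int) else 0) -
      (if PySem.Set.contains p2k kv.1 then (1 : Int) else 0)) = 0
  · rw [if_neg (not_not_intro h), h]
    simp
  · rw [if_pos h]

theorem foldB_eq (p1k p2k : PySem.Set String) :
    ∀ (L : List (String × List (String × Int))) (z : Int × Int × Int × Int × Int),
      L.foldl (pvStepB p1k p2k) z =
        (z.1 + sumB p1k p2k "base_spe" L, z.2.1 + sumB p1k p2k "base_atk" L,
         z.2.2.1 + sumB p1k p2k "base_spa" L, z.2.2.2.1 + sumB p1k p2k "base_spd" L,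
         z.2.2.2.2 + sumB p1k p2k "base_hp" L) := by
  intro L
  induction L with
  | nil => intro z; simp [sumB]
  | cons kv L ih =>
    intro z
    simp only [List.foldl_cons, pvStepB_eq]
    rw [ih]
    simp only [sumB, List.map_cons, List.sum_cons, Prod.mk.injEq]
    refine ⟨by ring, by ring, by ring, by ring, by ring⟩

-- one dict lookup as a sum over the items, when the keys are distinct
theorem lookup_sum (L : List (String × List (String × Int)))
    (hnd : (L.map Prod.fst).Nodup) (p : String) (f : List (String × Int) → Int) :
    (if (PySem.Dict.mk L).contains p then f ((PySem.Dict.mk L).getD p []) else 0)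
      = (L.map (fun kv => if kv.1 = p then f kv.2 else 0)).sum := by
  induction L with
  | nil => simp [PySem.Dict.contains]
  | cons kv L ih =>
    simp only [List.map_cons, List.nodup_cons] at hnd
    by_cases h : kv.1 = p
    · have htail : (L.map (fun kv' => if kv'.1 = p then f kv'.2 else 0)).sum = 0 := by
        apply List.sum_eq_zero
        intro x hx
        obtain ⟨kv', hkv', hfx⟩ := List.mem_map.mp hx
        have : kv'.1 ≠ p := by
          intro hpe
          exact hnd.1 (h ▸ hpe ▸ List.mem_map_of_mem hkv')
        simp [this] at hfx
        omega
      simp [PySem.Dict.contains, PySem.Dict.getD, PySem.Dict.get?, h, htail]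
    · have := ih hnd.2
      simp only [List.map_cons, List.sum_cons, if_neg h, zero_add]
      rw [← this]
      have hb2 : (kv.1 == p) = false := by simp [h]
      simp only [PySem.Dict.contains, PySem.Dict.getD, PySem.Dict.get?, List.any_cons, hb2,
        Bool.false_or]
      rw [List.find?_cons_of_neg (by simp [h])]

-- sum over team keys of guarded lookups = sum over registry items with a 0/1 membership weight
theorem mem_sum (d : PySem.Dict String (List (String × Int))) (hd : d.keys.Nodup)
    (s : String) :
    ∀ ks : List String, ks.Nodup →
      (ks.map (fun p => if d.contains p then (PySem.Dict.ofList (d.getD p [])).getD s 0 else 0)).sum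
        = (d.items.map (fun kv => (if kv.1 ∈ ks then (1 : Int) else 0) * (PySem.Dict.ofList kv.2).getD s 0)).sum := by
  intro ks
  induction ks with
  | nil => intro _; simp
  | cons p ks ih =>
    intro hnd
    simp only [List.nodup_cons] at hnd
    simp only [List.map_cons, List.sum_cons]
    obtain ⟨L⟩ := d
    have hL : (L.map Prod.fst).Nodup := hd
    rw [lookup_sum L hL p (fun v => (PySem.Dict.ofList v).getD s 0), ih hnd.2,
      ← PySem.List.sum_map_add_int]
    congr 1
    apply List.map_congr_left
    intro kv _
    by_cases h1 : kv.1 = p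
    · have h2 : kv.1 ∉ ks := h1 ▸ hnd.1
      simp [h1]
      intro hp
      exact absurd hp (h1 ▸ h2)
    · by_cases h2 : kv.1 ∈ ks <;> simp [h1, h2]

-- the two per-stat totals agree: A's two team sums differenced = B's signed registry sum
theorem main_comp (reg : PySem.Dict String (List (String × Int))) (hr : reg.keys.Nodup)
    (K1 K2 : List String) (h1 : K1.Nodup) (h2 : K2.Nodup) (s : String) :
    sumC reg s K1 - sumC reg s K2
      = sumB (PySem.Set.ofList K1) (PySem.Set.ofList K2) s reg.items := by
  unfold sumC sumB
  rw [mem_sum reg hr s K1 h1, mem_sum reg hr s K2 h2, sub_eq_iff_eq_add,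
    ← PySem.List.sum_map_add_int]
  apply congrArg List.sum
  apply List.map_congr_left
  intro kv _
  by_cases m1 : kv.1 ∈ K1 <;> by_cases m2 : kv.1 ∈ K2 <;>
    simp [m1, m2, PySem.Set.contains, PySem.Set.mem_ofList]

-- ===== VERDICT (by name: the statement is the Claim_ definition above) =====
theorem compute_base_stat_differences_spec : Claim_equal_compute_base_stat_differences := by
  intro p1 p2 sr _ _
  unfold Spec_compute_base_stat_differences
  simp only [compute_base_stat_differences, compute_base_stat_differences_alt]
  rw [foldA_eq, foldA_eq, foldB_eq]
  simp only [Prod.mk.injEq, zero_add]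
  refine ⟨?_, ?_, ?_, ?_, ?_⟩ <;>
    exact main_comp _ (PySem.Dict.nodup_keys_ofList _) _ _
      (PySem.Dict.nodup_keys_ofList _) (PySem.Dict.nodup_keys_ofList _) _
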